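-- pv_equiv track=rewrite | github.com/swifttarrow/oh-sheet | backend/services/melody_extraction.py | _path_to_midi_runs
-- ===== SOURCE A (Python) =====
-- from typing import Any
--
-- BASE_MIDI = 21                       # A0 — bin 0 of the contour matrix
--
-- BINS_PER_SEMITONE = 3                # CONTOURS_BINS_PER_SEMITONE
--
-- def bin_to_midi(bin_idx: int) -> int:
--     """Round a contour bin back to the nearest integer MIDI pitch."""
--     return BASE_MIDI + int(round(bin_idx / BINS_PER_SEMITONE))
--
-- def _path_to_midi_runs(path: Any) -> list[tuple[int, int, int]]:
--     """Group consecutive voiced frames at the same integer MIDI pitch.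
--
--     Returns a list of ``(start_frame, end_frame_exclusive, midi_pitch)``
--     tuples. Unvoiced frames (path value < 0) break runs. We round each
--     voiced bin to its nearest integer MIDI pitch via :func:`bin_to_midi`
--     — the sub-semitone precision is thrown away here because the
--     downstream tagging only needs semitone resolution.
--     """
--     runs: list[tuple[int, int, int]] = []
--     n = len(path)
--     i = 0
--     while i < n:
--         if path[i] < 0:
--             i += 1
--             continue
--         midi = bin_to_midi(int(path[i]))
--         j = i + 1
--         while j < n and path[j] >= 0 and bin_to_midi(int(path[j])) == midi:
--             j += 1
--         runs.append((i, j, midi))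
--         i = j
--     return runs
-- ===== SOURCE B (Python) =====
-- from typing import Any
--
-- BASE_MIDI = 21
-- BINS_PER_SEMITONE = 3
--
-- def bin_to_midi(bin_idx: int) -> int:
--     return BASE_MIDI + int(round(bin_idx / BINS_PER_SEMITONE))
--
-- def _path_to_midi_runs(path: Any) -> list[tuple[int, int, int]]:
--     """Single flat pass maintaining run state (run_start, current_midi)."""
--     runs: list[tuple[int, int, int]] = []
--     run_start = -1          # -1 = no open run
--     cur = 0
--     for i, v in enumerate(path):
--         if v < 0:
--             if run_start >= 0:
--                 runs.append((run_start, i, cur))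
--                 run_start = -1
--         else:
--             m = bin_to_midi(int(v))
--             if run_start < 0:
--                 run_start, cur = i, m
--             elif m != cur:
--                 runs.append((run_start, i, cur))
--                 run_start, cur = i, m
--     if run_start >= 0:
--         runs.append((run_start, len(path), cur))
--     return runs
-- ===== Notes on version B (the rewrite author's own statement) =====
-- stated objective: alternative
-- what changed: Replaced the two-pointer outer/inner while loops (which scan ahead to each run's end) by a single flat enumerate pass that maintains run state (run_start, current_midi) and flushes on unvoiced frames, pitch changes, and end-of-sequence.
import Mathlib
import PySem

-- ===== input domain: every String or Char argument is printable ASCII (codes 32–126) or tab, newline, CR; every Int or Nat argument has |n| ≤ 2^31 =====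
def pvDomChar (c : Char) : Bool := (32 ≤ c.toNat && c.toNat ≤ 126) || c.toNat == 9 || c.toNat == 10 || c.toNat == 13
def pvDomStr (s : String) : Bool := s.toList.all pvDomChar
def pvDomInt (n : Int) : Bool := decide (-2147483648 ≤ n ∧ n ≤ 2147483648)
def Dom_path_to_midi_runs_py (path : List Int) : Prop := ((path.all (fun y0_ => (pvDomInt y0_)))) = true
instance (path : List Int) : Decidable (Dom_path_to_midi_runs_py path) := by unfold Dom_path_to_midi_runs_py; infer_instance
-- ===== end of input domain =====

-- Port of backend/services/melody_extraction.py `_path_to_midi_runs`.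
-- B replaces A's two-pointer outer/inner while loops by one flat enumerate pass with run state.


-- ===== PORT A =====
-- bin_to_midi: 21 + int(round(b/3)).  Hand-ported exactly: the fractional part of b/3 is
-- 0, 1/3 or 2/3 (never a .5 tie, and no float error can cross 1/2 for |b| ≤ 2^31),
-- so round(b/3) = (b+1)//3 with Python floor division.  Shared by both Pythons.
def binToMidi (b : Int) : Int := 21 + PySem.Int.floordiv (b + 1) 3

-- inner while: `while j < n and path[j] >= 0 and bin_to_midi(int(path[j])) == midi: j += 1`
def aInner (path : List Int) (n midi j : Int) : Int :=
  if h : j < n ∧ 0 ≤ PySem.List.pyGetD path j 0 ∧ binToMidi (PySem.List.pyGetD path j 0) = midi then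
    aInner path n midi (j + 1)
  else j
termination_by (n - j).toNat
decreasing_by omega

theorem aInner_ge (path : List Int) (n midi j : Int) : j ≤ aInner path n midi j := by
  rw [aInner]
  split
  · have := aInner_ge path n midi (j + 1); omega
  · exact le_refl j
termination_by (n - j).toNat
decreasing_by omega

-- outer while over i, appending (i, j, midi) runs
def aOuter (path : List Int) (n i : Int) (runs : List (Int × Int × Int)) : List (Int × Int × Int) :=
  if _h : i < n then
    let v := PySem.List.pyGetD path i 0
    if v < 0 then aOuter path n (i + 1) runs
    else
      let midi := binToMidi v
      let j := aInner path n midi (i + 1)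
      aOuter path n j (runs ++ [(i, j, midi)])
  else runs
termination_by (n - i).toNat
decreasing_by
  · omega
  · have := aInner_ge path n (binToMidi (PySem.List.pyGetD path i 0)) (i + 1); omega

def path_to_midi_runs_py (path : List Int) : List (Int × Int × Int) :=
  aOuter path (path.length : Int) 0 []

-- ===== PORT B =====
-- one enumerate pass maintaining (runs, run_start, current_midi); run_start = -1 means no open run
def bStep (st : List (Int × Int × Int) × Int × Int) (iv : Int × Int) :
    List (Int × Int × Int) × Int × Int :=
  let (runs, rs, cur) := st
  let (i, v) := iv
  if v < 0 then
    if 0 ≤ rs then (runs ++ [(rs, i, cur)], -1, 0) else (runs, rs, cur)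
  else
    let m := binToMidi v
    if rs < 0 then (runs, i, m)
    else if m ≠ cur then (runs ++ [(rs, i, cur)], i, m)
    else (runs, rs, cur)

-- final flush: `if run_start >= 0: runs.append((run_start, len(path), cur))`
def bFinish (n : Int) (st : List (Int × Int × Int) × Int × Int) : List (Int × Int × Int) :=
  if 0 ≤ st.2.1 then st.1 ++ [(st.2.1, n, st.2.2)] else st.1

def path_to_midi_runs_py_alt (path : List Int) : List (Int × Int × Int) :=
  bFinish (path.length : Int) ((PySem.List.enumerate path 0).foldl bStep ([], -1, 0))

-- ===== PRECONDITION & SPEC =====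
def Spec_path_to_midi_runs_py (path : List Int) (out : List (Int × Int × Int)) : Prop := out = path_to_midi_runs_py_alt path
instance (path : List Int) (out : List (Int × Int × Int)) : Decidable (Spec_path_to_midi_runs_py path out) := by unfold Spec_path_to_midi_runs_py; infer_instance

-- ===== CLAIM (what is proved, stated in full; the proofs are below) =====
def Claim_equal_path_to_midi_runs_py : Prop := ∀ (path : List Int), Dom_path_to_midi_runs_py path → Spec_path_to_midi_runs_py path (path_to_midi_runs_py path)

-- ===== LEMMAS AND PROOFS =====

-- Combined invariant, by induction on the remaining length path.length - k:
--  (closed) folding B from a closed state over the suffix from k equals A's outer loop at i = k;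
--  (open)   folding B from an open run (rs, cur) over the suffix from k equals A scanning the
--           run's end with aInner, flushing (rs, end, cur), and continuing.
theorem pv_main (path : List Int) (m : Nat) :
    ∀ k : Nat, path.length - k = m → k ≤ path.length →
      (∀ acc, bFinish (path.length : Int)
          ((PySem.List.enumerate (path.drop k) (k : Int)).foldl bStep (acc, -1, 0))
        = aOuter path (path.length : Int) (k : Int) acc)
      ∧ (∀ acc (rs cur : Int), 0 ≤ rs →
          bFinish (path.length : Int)
              ((PySem.List.enumerate (path.drop k) (k : Int)).foldl bStep (acc, rs, cur))
            = aOuter path (path.length : Int) (aInner path (path.length : Int) cur (k : Int))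
                (acc ++ [(rs, aInner path (path.length : Int) cur (k : Int), cur)])) := by
  induction m with
  | zero =>
    intro k hk hk2
    have hke : k = path.length := by omega
    have hdrop : path.drop k = [] := by rw [hke]; simp
    constructor
    · intro acc
      rw [hdrop, aOuter]
      simp [PySem.List.enumerate, bFinish, hke]
    · intro acc rs cur hrs
      rw [hdrop, aInner, aOuter]
      simp [PySem.List.enumerate, bFinish, hke, hrs]
  | succ m ih =>
    intro k hk hk2
    have hklt : k < path.length := by omega
    have hdrop : path.drop k = path[k] :: path.drop (k + 1) := List.drop_eq_getElem_cons hklt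
    have hget : PySem.List.pyGetD path (k : Int) 0 = path[k] := by
      simp [PySem.List.pyGetD_natCast, List.getD_eq_getElem?_getD, hklt]
    have hcast : ((k : Int) + 1) = ((k + 1 : Nat) : Int) := by push_cast; ring
    have hlt : (k : Int) < (path.length : Int) := by exact_mod_cast hklt
    obtain ⟨ih1, ih2⟩ := ih (k + 1) (by omega) (by omega)
    constructor
    · intro acc
      rw [hdrop, PySem.List.enumerate_cons, List.foldl_cons, aOuter]
      by_cases hv : path[k] < 0
      · simp only [bStep, hv, dif_pos hlt, hget]
        norm_num
        rw [hcast]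
        exact ih1 acc
      · simp only [bStep, hv, dif_pos hlt, hget]
        norm_num
        rw [hcast]
        exact ih2 acc (k : Int) (binToMidi path[k]) (by positivity)
    · intro acc rs cur hrs
      rw [hdrop, PySem.List.enumerate_cons, List.foldl_cons, aInner]
      by_cases hv : path[k] < 0
      · rw [dif_neg (by rw [hget]; omega)]
        simp only [bStep]
        rw [if_pos hv, if_pos hrs]
        rw [hcast]
        have h2 : aOuter path (path.length : Int) (k : Int) (acc ++ [(rs, (k : Int), cur)])
            = aOuter path (path.length : Int) ((k : Int) + 1) (acc ++ [(rs, (k : Int), cur)]) := by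
          rw [aOuter, dif_pos hlt, hget, if_pos hv]
        rw [h2, hcast]
        exact ih1 (acc ++ [(rs, (k : Int), cur)])
      · by_cases hm : binToMidi path[k] = cur
        · rw [dif_pos (by rw [hget]; exact ⟨hlt, by omega, hm⟩)]
          simp only [bStep]
          rw [if_neg hv, if_neg (by omega : ¬ rs < 0), if_neg (by simp [hm])]
          rw [hcast]
          exact ih2 acc rs cur hrs
        · rw [dif_neg (by rw [hget]; tauto)]
          simp only [bStep]
          rw [if_neg hv, if_neg (by omega : ¬ rs < 0), if_pos (by simp [hm])]
          have h2 : aOuter path (path.length : Int) (k : Int) (acc ++ [(rs, (k : Int), cur)])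
              = aOuter path (path.length : Int)
                  (aInner path (path.length : Int) (binToMidi path[k]) ((k : Int) + 1))
                  ((acc ++ [(rs, (k : Int), cur)]) ++
                    [((k : Int), aInner path (path.length : Int) (binToMidi path[k]) ((k : Int) + 1),
                      binToMidi path[k])]) := by
            rw [aOuter, dif_pos hlt, hget, if_neg hv]
          rw [h2, hcast]
          have := ih2 (acc ++ [(rs, (k : Int), cur)]) (k : Int) (binToMidi path[k]) (by positivity)
          simpa using this

-- ===== VERDICT (by name: the statement is the Claim_ definition above) =====
theorem path_to_midi_runs_py_spec : Claim_equal_path_to_midi_runs_py := by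
  intro path _
  unfold Spec_path_to_midi_runs_py path_to_midi_runs_py path_to_midi_runs_py_alt
  have h := (pv_main path (path.length - 0) 0 rfl (Nat.zero_le _)).1 []
  simpa using h.symm
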